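-- pv_equiv track=rewrite | github.com/Dale-Guantia/CS50-Journey | CS50X/sentimental-cash/cash.py | calculate_pennies
-- ===== SOURCE A (Python) =====
-- def calculate_pennies(cents):
--     num_pennies = 0
--
--     while True:
--         if 1 <= cents:
--             num_pennies += 1
--             cents -= 1
--         else:
--             return num_pennies
-- ===== SOURCE B (Python) =====
-- def calculate_pennies(cents):
--     return cents if cents > 0 else 0
-- ===== Notes on version B (the rewrite author's own statement) =====
-- stated objective: faster
-- what changed: replaced the subtract-one-per-penny loop by the closed form max(cents, 0) computed with one comparison
import Mathlib
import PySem

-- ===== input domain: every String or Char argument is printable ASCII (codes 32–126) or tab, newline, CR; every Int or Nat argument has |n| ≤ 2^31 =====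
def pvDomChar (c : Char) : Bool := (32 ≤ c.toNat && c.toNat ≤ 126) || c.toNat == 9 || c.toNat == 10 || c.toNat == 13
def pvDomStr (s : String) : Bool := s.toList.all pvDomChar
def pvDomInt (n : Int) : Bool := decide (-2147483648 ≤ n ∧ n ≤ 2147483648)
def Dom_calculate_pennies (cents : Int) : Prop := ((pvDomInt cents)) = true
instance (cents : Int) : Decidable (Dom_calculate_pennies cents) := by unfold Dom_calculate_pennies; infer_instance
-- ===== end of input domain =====

-- B replaces A's subtract-1-per-penny loop by the closed form max(cents, 0): asymptotically faster.

-- ===== PORT A =====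
-- the `while True` loop: count up while 1 ≤ cents, else return the counter
def calculate_pennies_loop (cents num_pennies : Int) : Int :=
  if 1 ≤ cents then
    calculate_pennies_loop (cents - 1) (num_pennies + 1)
  else
    num_pennies
termination_by cents.toNat
decreasing_by
  have : cents.toNat = (cents - 1).toNat + 1 := by omega
  omega

def calculate_pennies (cents : Int) : Int := calculate_pennies_loop cents 0

-- ===== PORT B =====
def calculate_pennies_alt (cents : Int) : Int := if cents > 0 then cents else 0

-- ===== PRECONDITION & SPEC =====
def Spec_calculate_pennies (cents : Int) (out : Int) : Prop := out = calculate_pennies_alt cents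
instance (cents : Int) (out : Int) : Decidable (Spec_calculate_pennies cents out) := by unfold Spec_calculate_pennies; infer_instance

-- ===== CLAIM (what is proved, stated in full; the proofs are below) =====
def Claim_equal_calculate_pennies : Prop := ∀ (cents : Int), Dom_calculate_pennies cents → Spec_calculate_pennies cents (calculate_pennies cents)

-- ===== LEMMAS AND PROOFS =====
theorem calculate_pennies_loop_eq (n : Nat) : ∀ (cents acc : Int), cents.toNat = n →
    calculate_pennies_loop cents acc = acc + (if cents > 0 then cents else 0) := by
  induction n with
  | zero =>
    intro cents acc h
    rw [calculate_pennies_loop]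
    split_ifs with h1 h2 <;> omega
  | succ k ih =>
    intro cents acc h
    by_cases h1 : 1 ≤ cents
    · rw [calculate_pennies_loop, if_pos h1, ih (cents - 1) (acc + 1) (by omega)]
      split_ifs <;> omega
    · rw [calculate_pennies_loop, if_neg h1]
      split_ifs <;> omega

-- ===== VERDICT (by name: the statement is the Claim_ definition above) =====
theorem calculate_pennies_spec : Claim_equal_calculate_pennies := by
  intro cents _
  unfold Spec_calculate_pennies calculate_pennies calculate_pennies_alt
  rw [calculate_pennies_loop_eq cents.toNat cents 0 rfl]
  omega
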